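-- pv_equiv track=rewrite | github.com/Fondamenti18/fondamenti-di-programmazione | students/1715903/homework03/program02.py | quindici
-- ===== SOURCE A (Python) =====
-- def quindici(im,y,x,l,tl):
--     for b in im:
--         y+=1
--         if y%40==0:
--             for a in b:
--                 x+=1
--                 if x%40==0:
--                     l.append(a)
--             tl.append(l)
--         l=[]
--     return tl
-- ===== SOURCE B (Python) =====
-- def quindici(im, y, x, l, tl):
--     for b in im:
--         y += 1
--         if y % 40 == 0:
--             # phase of the next multiple of 40 relative to the current x counter
--             i = (-(x + 1)) % 40
--             n = len(b)
--             while i < n: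
--                 l.append(b[i])
--                 i += 40
--             x += n
--             tl.append(l)
--         l = []
--     return tl
-- ===== Notes on version B (the rewrite author's own statement) =====
-- stated objective: alternative
-- what changed: The per-pixel counter-and-modulo inner loop is replaced by computing the stride phase ((-(x+1)) % 40) once per processed row and visiting only every 40th element with an index-jumping while loop, adding len(b) to x in one step.
import Mathlib
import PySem

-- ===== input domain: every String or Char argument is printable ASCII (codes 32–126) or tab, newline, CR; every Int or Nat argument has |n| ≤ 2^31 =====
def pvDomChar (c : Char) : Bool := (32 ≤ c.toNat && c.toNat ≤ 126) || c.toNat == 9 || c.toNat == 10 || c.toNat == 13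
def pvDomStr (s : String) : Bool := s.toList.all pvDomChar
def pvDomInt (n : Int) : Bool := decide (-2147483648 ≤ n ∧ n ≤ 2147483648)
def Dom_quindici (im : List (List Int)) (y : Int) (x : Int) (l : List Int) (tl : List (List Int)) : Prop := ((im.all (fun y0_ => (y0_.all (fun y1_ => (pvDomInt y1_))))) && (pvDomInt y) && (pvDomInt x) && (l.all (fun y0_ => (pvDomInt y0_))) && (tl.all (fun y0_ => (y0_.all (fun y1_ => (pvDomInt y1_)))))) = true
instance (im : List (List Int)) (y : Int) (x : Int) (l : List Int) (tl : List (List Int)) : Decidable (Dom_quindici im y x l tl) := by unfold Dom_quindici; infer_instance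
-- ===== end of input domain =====

-- Port of A (counter loop) vs B (computed phase + stride-40 while loop over only the sampled
-- indices); return-value equivalence only: both Pythons mutate l/tl in place the same way.


-- ===== PORT A =====
def quindici (im : List (List Int)) (y : Int) (x : Int) (l : List Int) (tl : List (List Int)) : List (List Int) :=
  (im.foldl (fun (s : Int × Int × List Int × List (List Int)) b =>
      let y' := s.1 + 1
      if PySem.Int.mod y' 40 == 0 then
        let xl := b.foldl (fun (p : Int × List Int) a =>
            let x' := p.1 + 1
            if PySem.Int.mod x' 40 == 0 then (x', p.2 ++ [a]) else (x', p.2))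
          (s.2.1, s.2.2.1)
        (y', xl.1, ([] : List Int), s.2.2.2 ++ [xl.2])
      else (y', s.2.1, ([] : List Int), s.2.2.2))
    (y, x, l, tl)).2.2.2

-- ===== PORT B =====
-- the `while i < n: l.append(b[i]); i += 40` loop of Source B
def pvBWhile (b : List Int) (n : Int) (i : Int) (l : List Int) : List Int :=
  if i < n then pvBWhile b n (i + 40) (l ++ [PySem.List.pyGetD b i 0]) else l
termination_by (n - i).toNat
decreasing_by omega

def quindici_alt (im : List (List Int)) (y : Int) (x : Int) (l : List Int) (tl : List (List Int)) : List (List Int) :=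
  (im.foldl (fun (s : Int × Int × List Int × List (List Int)) b =>
      let y' := s.1 + 1
      if PySem.Int.mod y' 40 == 0 then
        let i := PySem.Int.mod (-(s.2.1 + 1)) 40
        let n : Int := b.length
        let l' := pvBWhile b n i s.2.2.1
        (y', s.2.1 + n, ([] : List Int), s.2.2.2 ++ [l'])
      else (y', s.2.1, ([] : List Int), s.2.2.2))
    (y, x, l, tl)).2.2.2

-- ===== PRECONDITION & SPEC =====
def Spec_quindici (im : List (List Int)) (y : Int) (x : Int) (l : List Int) (tl : List (List Int)) (out : List (List Int)) : Prop := out = quindici_alt im y x l tl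
instance (im : List (List Int)) (y : Int) (x : Int) (l : List Int) (tl : List (List Int)) (out : List (List Int)) : Decidable (Spec_quindici im y x l tl out) := by unfold Spec_quindici; infer_instance

-- ===== CLAIM (what is proved, stated in full; the proofs are below) =====
def Claim_equal_quindici : Prop := ∀ (im : List (List Int)) (y : Int) (x : Int) (l : List Int) (tl : List (List Int)), Dom_quindici im y x l tl → Spec_quindici im y x l tl (quindici im y x l tl)

-- ===== LEMMAS AND PROOFS =====

lemma pvBWhile_stop (b : List Int) (n i : Int) (l : List Int) (h : n ≤ i) :
    pvBWhile b n i l = l := by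
  rw [pvBWhile]
  simp [not_lt.mpr h]

lemma pvBWhile_step (b : List Int) (n i : Int) (l : List Int) (h : i < n) :
    pvBWhile b n i l = pvBWhile b n (i + 40) (l ++ [PySem.List.pyGetD b i 0]) := by
  conv_lhs => rw [pvBWhile]
  simp [h]

lemma pyGetD_cons_shift (a : Int) (b : List Int) (i : Int) (h : 1 ≤ i) :
    PySem.List.pyGetD (a :: b) i 0 = PySem.List.pyGetD b (i - 1) 0 := by
  obtain ⟨k, rfl⟩ : ∃ k : Nat, i = (k : Int) + 1 := ⟨(i - 1).toNat, by omega⟩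
  have h1 : ((k : Int) + 1) = ((k + 1 : Nat) : Int) := by push_cast; ring
  rw [show (k : Int) + 1 - 1 = ((k : Nat) : Int) from by ring, h1,
      PySem.List.pyGetD_natCast, PySem.List.pyGetD_natCast, List.getD_cons_succ]

lemma pvBWhile_cons (a : Int) (b : List Int) :
    ∀ (N : Nat) (n i : Int) (l : List Int), 1 ≤ i → (n + 1 - i).toNat ≤ N →
      pvBWhile (a :: b) (n + 1) i l = pvBWhile b n (i - 1) l := by
  intro N
  induction N with
  | zero =>
    intro n i l hi hm
    rw [pvBWhile_stop _ _ _ _ (by omega), pvBWhile_stop _ _ _ _ (by omega)]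
  | succ N ih =>
    intro n i l hi hm
    by_cases h : i < n + 1
    · rw [pvBWhile_step _ _ _ _ h, pvBWhile_step _ _ _ _ (show i - 1 < n by omega)]
      rw [pyGetD_cons_shift a b i hi]
      rw [ih n (i + 40) (l ++ [PySem.List.pyGetD b (i - 1) 0]) (by omega) (by omega)]
      congr 1
      omega
    · rw [pvBWhile_stop _ _ _ _ (by omega), pvBWhile_stop _ _ _ _ (by omega)]

-- A's counting inner loop equals B's phase + stride-40 loop.
lemma inner_eq : ∀ (b : List Int) (x : Int) (l : List Int),
    b.foldl (fun (p : Int × List Int) a =>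
        let x' := p.1 + 1
        if PySem.Int.mod x' 40 == 0 then (x', p.2 ++ [a]) else (x', p.2)) (x, l)
      = (x + b.length, pvBWhile b b.length (PySem.Int.mod (-(x + 1)) 40) l) := by
  intro b
  induction b with
  | nil =>
    intro x l
    rw [List.foldl_nil]
    rw [pvBWhile_stop _ _ _ _ (by
      rw [PySem.Int.mod_eq_emod_of_pos (by norm_num)]
      simp only [List.length_nil, Int.natCast_zero]
      omega)]
    simp only [List.length_nil, Nat.cast_zero, add_zero]
  | cons a b ih =>
    intro x l
    rw [List.foldl_cons]
    simp only
    have hmod : ∀ z : Int, PySem.Int.mod z 40 = z % 40 :=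
      fun z => PySem.Int.mod_eq_emod_of_pos (by norm_num)
    have hlen : (((a :: b).length : Nat) : Int) = (b.length : Int) + 1 := by
      push_cast [List.length_cons]; ring
    by_cases h : (x + 1) % 40 = 0
    · have hb : (PySem.Int.mod (x + 1) 40 == 0) = true := by rw [hmod]; simp [h]
      simp only [hb, if_pos]
      rw [ih]
      have hoff : PySem.Int.mod (-(x + 1)) 40 = 0 := by rw [hmod]; omega
      have hoff' : PySem.Int.mod (-(x + 1 + 1)) 40 = 39 := by rw [hmod]; omega
      rw [hoff, hlen]
      rw [pvBWhile_step _ _ _ _ (show (0 : Int) < (b.length : Int) + 1 by omega)]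
      rw [show (0 : Int) + 40 = 40 from by norm_num]
      rw [PySem.List.pyGetD_zero_cons]
      rw [pvBWhile_cons a b ((b.length : Int) + 1 - 40).toNat (b.length : Int) 40 _ (by omega) (by omega)]
      rw [show (40 : Int) - 1 = 39 from by norm_num, hoff']
      simp only [Prod.mk.injEq]
      exact ⟨by omega, trivial⟩
    · have hb : (PySem.Int.mod (x + 1) 40 == 0) = false := by rw [hmod]; simp [h]
      simp only [hb, Bool.false_eq_true, if_neg, not_false_iff]
      rw [ih]
      have hoff1 : 1 ≤ PySem.Int.mod (-(x + 1)) 40 := by rw [hmod]; omega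
      rw [hlen]
      rw [pvBWhile_cons a b ((b.length : Int) + 1 - PySem.Int.mod (-(x + 1)) 40).toNat
            (b.length : Int) (PySem.Int.mod (-(x + 1)) 40) l hoff1 (by omega)]
      have h2 : PySem.Int.mod (-(x + 1)) 40 - 1 = PySem.Int.mod (-(x + 1 + 1)) 40 := by
        rw [hmod, hmod]; omega
      rw [h2]
      simp only [Prod.mk.injEq]
      exact ⟨by omega, trivial⟩

lemma outer_eq : ∀ (im : List (List Int)) (y x : Int) (l : List Int) (tl : List (List Int)),
    quindici im y x l tl = quindici_alt im y x l tl := by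
  intro im
  induction im with
  | nil => intro y x l tl; rfl
  | cons b im ih =>
    intro y x l tl
    unfold quindici quindici_alt
    rw [List.foldl_cons, List.foldl_cons]
    simp only
    by_cases h : (PySem.Int.mod (y + 1) 40 == 0) = true
    · simp only [h, if_pos]
      rw [inner_eq]
      exact ih (y + 1) (x + b.length) [] (tl ++ [pvBWhile b b.length (PySem.Int.mod (-(x + 1)) 40) l])
    · simp only [h, if_neg, Bool.not_eq_true]
      exact ih (y + 1) x [] tl

-- ===== VERDICT (by name: the statement is the Claim_ definition above) =====
theorem quindici_spec : Claim_equal_quindici := by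
  intro im y x l tl _
  unfold Spec_quindici
  exact outer_eq im y x l tl
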